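-- pv_equiv track=rewrite | github.com/quocthai9120/UW-NLP-Capstone-SP22 | train_helper.py | bigram
-- ===== SOURCE A (Python) =====
-- def bigram(train_data, unknown_chars):
--     count_dict = {} # NOTE: this is a nested dictionary
--     for line in train_data:
--         prev_token = '<start>'
--         for token in line:
--             if token in unknown_chars:
--                 token = '<unk>'
--             if prev_token not in count_dict:
--                 count_dict[prev_token] = {}
--             count_dict[prev_token][token] = count_dict[prev_token][token] + 1 if token in count_dict[prev_token] else 1
--             prev_token = token
--         if prev_token not in count_dict:
--                 count_dict[prev_token] = {}
--         count_dict[prev_token]['<stop>'] = count_dict[prev_token]['<stop>'] + 1 if '<stop>' in count_dict[prev_token] else 1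
--     sum_map = {}
--     for sequence in count_dict:
--         ch_map = count_dict[sequence]
--         count_seq = sum(ch_map.values())
--         sum_map[sequence] = count_seq
--
--     return sum_map, count_dict
-- ===== SOURCE B (Python) =====
-- def bigram(train_data, unknown_chars):
--     # Flatten the corpus into one stream of (prev, next) transition pairs via zip,
--     # then count them in a single grouping pass that maintains the per-prev totals
--     # incrementally (no trailing aggregation pass).
--     pairs = []
--     for line in train_data:
--         toks = ['<unk>' if t in unknown_chars else t for t in line]
--         pairs.extend(zip(['<start>'] + toks, toks + ['<stop>']))
--     sum_map = {}
--     count_dict = {}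
--     for p, t in pairs:
--         if p not in count_dict:
--             sum_map[p] = 0
--             count_dict[p] = {}
--         inner = count_dict[p]
--         inner[t] = inner.get(t, 0) + 1
--         sum_map[p] += 1
--     return sum_map, count_dict
-- ===== Notes on version B (the rewrite author's own statement) =====
-- stated objective: alternative
-- what changed: B flattens the corpus into a single stream of (prev, next) transition pairs via zip (replacing the nested per-line loop with explicit prev-state and the separate '<stop>' step), then counts that stream in one grouping pass that maintains per-prev totals incrementally, dropping A's trailing aggregation pass over count_dict.
import Mathlib
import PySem

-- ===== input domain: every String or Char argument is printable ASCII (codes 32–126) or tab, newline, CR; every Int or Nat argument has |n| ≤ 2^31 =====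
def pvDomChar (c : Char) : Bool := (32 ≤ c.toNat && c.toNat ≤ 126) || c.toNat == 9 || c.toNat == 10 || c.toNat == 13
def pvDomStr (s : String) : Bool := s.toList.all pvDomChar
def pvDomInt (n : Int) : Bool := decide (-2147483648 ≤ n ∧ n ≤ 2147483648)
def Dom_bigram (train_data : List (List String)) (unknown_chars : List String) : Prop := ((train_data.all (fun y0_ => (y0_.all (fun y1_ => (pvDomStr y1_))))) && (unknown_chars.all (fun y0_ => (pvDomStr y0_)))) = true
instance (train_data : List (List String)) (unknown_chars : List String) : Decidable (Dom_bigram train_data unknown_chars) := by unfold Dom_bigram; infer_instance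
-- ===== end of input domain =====

-- B rebuilds the same bigram tables from a flattened stream of (prev, next)
-- transition pairs in one grouping pass with incrementally maintained totals,
-- instead of A's nested loops plus a trailing aggregation pass (objective: alternative).

-- ===== PORT A =====
-- inner loop body: token normalization, ensure count_dict[prev], conditional increment
def pvAStep (unknown_chars : List String)
    (st : PySem.Dict String (PySem.Dict String Int) × String) (token0 : String) :
    PySem.Dict String (PySem.Dict String Int) × String :=
  let token := if token0 ∈ unknown_chars then "<unk>" else token0
  let cd := if st.1.contains st.2 then st.1 else st.1.insert st.2 PySem.Dict.empty
  let inner := cd.getD st.2 PySem.Dict.empty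
  (cd.insert st.2 (if inner.contains token then inner.insert token (inner.getD token 0 + 1)
                   else inner.insert token 1), token)

-- one line of A's outer loop: the token loop, then the '<stop>' transition
def pvALine (unknown_chars : List String)
    (cd0 : PySem.Dict String (PySem.Dict String Int)) (line : List String) :
    PySem.Dict String (PySem.Dict String Int) :=
  let st := line.foldl (pvAStep unknown_chars) (cd0, "<start>")
  let cd := if st.1.contains st.2 then st.1 else st.1.insert st.2 PySem.Dict.empty
  let inner := cd.getD st.2 PySem.Dict.empty
  cd.insert st.2 (if inner.contains "<stop>" then inner.insert "<stop>" (inner.getD "<stop>" 0 + 1)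
                  else inner.insert "<stop>" 1)

def bigram (train_data : List (List String)) (unknown_chars : List String) :
    (List (String × Int)) × (List (String × List (String × Int))) :=
  let cd := train_data.foldl (pvALine unknown_chars) PySem.Dict.empty
  let sm := cd.items.foldl (fun sm p => sm.insert p.1 p.2.values.sum)
              (PySem.Dict.empty : PySem.Dict String Int)
  (sm.items, cd.items.map (fun p => (p.1, p.2.items)))

-- ===== PORT B =====
def pvNorm (unknown_chars : List String) (t : String) : String :=
  if t ∈ unknown_chars then "<unk>" else t

-- the (prev, next) transition pairs contributed by one line
def pvPairs (unknown_chars : List String) (line : List String) : List (String × String) :=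
  let toks := line.map (pvNorm unknown_chars)
  List.zip ("<start>" :: toks) (toks ++ ["<stop>"])

-- one grouping step over the pair stream: ensure entries, bump count and total
def pvBStep (st : PySem.Dict String Int × PySem.Dict String (PySem.Dict String Int))
    (pt : String × String) :
    PySem.Dict String Int × PySem.Dict String (PySem.Dict String Int) :=
  let sm := if st.2.contains pt.1 then st.1 else st.1.insert pt.1 0
  let cd := if st.2.contains pt.1 then st.2 else st.2.insert pt.1 PySem.Dict.empty
  let inner := cd.getD pt.1 PySem.Dict.empty
  (sm.insert pt.1 (sm.getD pt.1 0 + 1), cd.insert pt.1 (inner.insert pt.2 (inner.getD pt.2 0 + 1)))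

def bigram_alt (train_data : List (List String)) (unknown_chars : List String) :
    (List (String × Int)) × (List (String × List (String × Int))) :=
  let pairs := train_data.foldl (fun acc line => acc ++ pvPairs unknown_chars line) []
  let st := pairs.foldl pvBStep (PySem.Dict.empty, PySem.Dict.empty)
  (st.1.items, st.2.items.map (fun p => (p.1, p.2.items)))

-- ===== PRECONDITION & SPEC =====
def Spec_bigram (train_data : List (List String)) (unknown_chars : List String) (out : (List (String × Int)) × (List (String × List (String × Int)))) : Prop := out = bigram_alt train_data unknown_chars
instance (train_data : List (List String)) (unknown_chars : List String) (out : (List (String × Int)) × (List (String × List (String × Int)))) : Decidable (Spec_bigram train_data unknown_chars out) := by unfold Spec_bigram; infer_instance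

-- ===== CLAIM (what is proved, stated in full; the proofs are below) =====
def Claim_equal_bigram : Prop := ∀ (train_data : List (List String)) (unknown_chars : List String), Dom_bigram train_data unknown_chars → Spec_bigram train_data unknown_chars (bigram train_data unknown_chars)

-- ===== LEMMAS AND PROOFS =====

-- the common single-pair update of the nested count dictionary
def pvU (cd : PySem.Dict String (PySem.Dict String Int)) (pt : String × String) :
    PySem.Dict String (PySem.Dict String Int) :=
  let cd1 := if cd.contains pt.1 then cd else cd.insert pt.1 PySem.Dict.empty
  let inner := cd1.getD pt.1 PySem.Dict.empty
  cd1.insert pt.1 (inner.insert pt.2 (inner.getD pt.2 0 + 1))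

lemma pvCondInsert (d : PySem.Dict String Int) (t : String) :
    (if d.contains t then d.insert t (d.getD t 0 + 1) else d.insert t 1) =
      d.insert t (d.getD t 0 + 1) := by
  split
  · rfl
  · rename_i h
    rw [PySem.Dict.getD_of_not_contains d 0 (by simpa using h), zero_add]

lemma pvAStep_eq (u : List String) (st : PySem.Dict String (PySem.Dict String Int) × String)
    (tok : String) :
    pvAStep u st tok = (pvU st.1 (st.2, pvNorm u tok), pvNorm u tok) := by
  simp only [pvAStep, pvU, pvNorm, pvCondInsert]

lemma pvALine_eq (u : List String) (cd : PySem.Dict String (PySem.Dict String Int))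
    (line : List String) :
    pvALine u cd line = (pvPairs u line).foldl pvU cd := by
  have aux : ∀ (rest : List String) (cd : PySem.Dict String (PySem.Dict String Int)) (prev : String),
      pvU (rest.foldl (pvAStep u) (cd, prev)).1 ((rest.foldl (pvAStep u) (cd, prev)).2, "<stop>")
        = (List.zip (prev :: rest.map (pvNorm u)) (rest.map (pvNorm u) ++ ["<stop>"])).foldl pvU cd := by
    intro rest
    induction rest with
    | nil => intro cd prev; simp
    | cons t rest ih =>
      intro cd prev
      simp only [List.foldl_cons, List.map_cons, List.cons_append, List.zip_cons_cons, pvAStep_eq]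
      exact ih (pvU cd (prev, pvNorm u t)) (pvNorm u t)
  have h := aux line cd "<start>"
  simp only [pvPairs]
  rw [← h]
  simp only [pvALine, pvU, pvCondInsert]

lemma pvBStep_snd (st : PySem.Dict String Int × PySem.Dict String (PySem.Dict String Int))
    (pt : String × String) : (pvBStep st pt).2 = pvU st.2 pt := rfl

-- value at a key is unique in a list with distinct first components
lemma pvMemUnique {v : Type} (l : List (String × v)) (hn : (l.map Prod.fst).Nodup)
    {k : String} {a b : v} (ha : (k, a) ∈ l) (hb : (k, b) ∈ l) : a = b := by
  have hkeys : (PySem.Dict.mk l).keys.Nodup := by simpa [PySem.Dict.keys] using hn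
  have h1 := PySem.Dict.get?_of_mem_items (PySem.Dict.mk l) ha hkeys
  have h2 := PySem.Dict.get?_of_mem_items (PySem.Dict.mk l) hb hkeys
  rw [h1] at h2
  exact Option.some.inj h2

-- overwriting the unique entry at key k changes the value sum by (w - v)
lemma pvOverwriteSum (k : String) (w : Int) :
    ∀ (l : List (String × Int)), (l.map Prod.fst).Nodup → ∀ v : Int, (k, v) ∈ l →
      ((l.map (fun q => if q.1 == k then (k, w) else q)).map Prod.snd).sum
        = (l.map Prod.snd).sum - v + w := by
  intro l
  induction l with
  | nil => intro _ v hv; cases hv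
  | cons q rest ih =>
    intro hn v hv
    rw [List.map_cons, List.nodup_cons] at hn
    obtain ⟨hq1, hq2⟩ := hn
    by_cases hq : q.1 = k
    · have hknot : k ∉ rest.map Prod.fst := hq ▸ hq1
      have hqv : q = (k, v) := by
        rcases List.mem_cons.1 hv with h1 | h1
        · exact h1.symm
        · exact absurd (List.mem_map_of_mem h1) hknot
      have hid : (rest.map (fun q => if q.1 == k then (k, w) else q)) = rest := by
        conv_rhs => rw [← List.map_id rest]
        refine List.map_congr_left ?_
        intro r hr
        have hrk : ¬ r.1 = k := fun hrk => hknot (hrk ▸ List.mem_map_of_mem hr)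
        simp [hrk]
      simp only [List.map_cons, hqv, beq_self_eq_true, if_true, hid, List.sum_cons]
      ring
    · have hqk : (q.1 == k) = false := beq_eq_false_iff_ne.2 hq
      rcases List.mem_cons.1 hv with h1 | h1
      · exact absurd (congrArg Prod.fst h1.symm) hq
      · simp only [List.map_cons, hqk, Bool.false_eq_true, if_false, List.sum_cons]
        rw [ih hq2 v h1]
        ring

-- bumping a key's count raises the value sum by one (keys distinct)
lemma pvValuesSumInsert (d : PySem.Dict String Int) (t : String) (hn : d.keys.Nodup) :
    (d.insert t (d.getD t 0 + 1)).values.sum = d.values.sum + 1 := by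
  by_cases h : d.contains t
  · obtain ⟨v, hv⟩ : ∃ v, (t, v) ∈ d.items := by
      have hk : t ∈ d.keys := (PySem.Dict.contains_iff_mem_keys d t).1 h
      simp only [PySem.Dict.keys, List.mem_map] at hk
      obtain ⟨q, hq, hq1⟩ := hk
      exact ⟨q.2, by rwa [show (t, q.2) = q from Prod.ext hq1.symm rfl]⟩
    have hg : d.getD t 0 = v := PySem.Dict.getD_of_mem_items d hv hn 0
    have hnd : (d.items.map Prod.fst).Nodup := by simpa [PySem.Dict.keys] using hn
    simp only [PySem.Dict.values]
    rw [PySem.Dict.items_insert_of_contains d _ h,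
        pvOverwriteSum t (d.getD t 0 + 1) d.items hnd v hv, hg]
    ring
  · have hcf : d.contains t = false := by simpa using h
    simp only [PySem.Dict.values]
    rw [PySem.Dict.items_insert_of_not_contains d _ hcf,
        PySem.Dict.getD_of_not_contains d 0 hcf]
    simp

-- the invariant B's fold maintains: sum_map mirrors the running totals of count_dict
def pvInv (sm : PySem.Dict String Int) (cd : PySem.Dict String (PySem.Dict String Int)) : Prop :=
  cd.keys.Nodup ∧ (∀ q ∈ cd.items, (q.2 : PySem.Dict String Int).keys.Nodup) ∧
  sm.items = cd.items.map (fun q => (q.1, q.2.values.sum))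

lemma pvInv_step (sm : PySem.Dict String Int) (cd : PySem.Dict String (PySem.Dict String Int))
    (pt : String × String) (h : pvInv sm cd) :
    pvInv (pvBStep (sm, cd) pt).1 (pvU cd pt) := by
  obtain ⟨hnd, hinner, hsm⟩ := h
  obtain ⟨p, t⟩ := pt
  have hndl : (cd.items.map Prod.fst).Nodup := by simpa [PySem.Dict.keys] using hnd
  have hsmkeys : sm.keys = cd.keys := by
    simp only [PySem.Dict.keys, hsm, List.map_map]; rfl
  have hsmnd : sm.keys.Nodup := hsmkeys ▸ hnd
  have hceq : sm.contains p = cd.contains p := by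
    rw [PySem.Dict.contains_eq_decide_mem_keys, PySem.Dict.contains_eq_decide_mem_keys, hsmkeys]
  by_cases hc : cd.contains p
  · obtain ⟨v, hv⟩ : ∃ v, (p, v) ∈ cd.items := by
      have hk : p ∈ cd.keys := (PySem.Dict.contains_iff_mem_keys cd p).1 hc
      simp only [PySem.Dict.keys, List.mem_map] at hk
      obtain ⟨q, hq, hq1⟩ := hk
      exact ⟨q.2, by rwa [show (p, q.2) = q from Prod.ext hq1.symm rfl]⟩
    have hgd : cd.getD p PySem.Dict.empty = v := PySem.Dict.getD_of_mem_items cd hv hnd _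
    have hU : pvU cd (p, t) = cd.insert p (v.insert t (v.getD t 0 + 1)) := by
      simp [pvU, hc, hgd]
    have hB : (pvBStep (sm, cd) (p, t)).1 = sm.insert p (sm.getD p 0 + 1) := by
      simp [pvBStep, hc]
    have hsg : sm.getD p 0 = v.values.sum := by
      refine PySem.Dict.getD_of_mem_items sm ?_ hsmnd 0
      rw [hsm]
      exact List.mem_map_of_mem hv
    refine ⟨?_, ?_, ?_⟩
    · rw [hU]; exact PySem.Dict.nodup_keys_insert _ _ _ hnd
    · rw [hU]
      intro q hq
      rcases (PySem.Dict.mem_items_insert cd p _ q).1 hq with h1 | ⟨h1, _⟩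
      · rw [h1]; exact PySem.Dict.nodup_keys_insert _ _ _ (hinner (p, v) hv)
      · exact hinner q h1
    · rw [hB, hU]
      rw [PySem.Dict.items_insert_of_contains sm _ (by rwa [hceq]),
          PySem.Dict.items_insert_of_contains cd _ hc, hsm, List.map_map, List.map_map]
      refine List.map_congr_left ?_
      intro q hq
      by_cases hqp : q.1 = p
      · have hqv : q.2 = v := by
          refine pvMemUnique cd.items hndl (k := p) ?_ hv
          rwa [show (p, q.2) = q from Prod.ext hqp.symm rfl]
        simp only [Function.comp_apply, hqp, beq_self_eq_true, if_true, hsg, hqv]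
        rw [pvValuesSumInsert v t (hinner (p, v) hv)]
      · simp [Function.comp_apply, hqp]
  · have hsc : sm.contains p = false := by rw [hceq]; simpa using hc
    have hcc : cd.contains p = false := by simpa using hc
    have hU : pvU cd (p, t) = cd.insert p (PySem.Dict.empty.insert t 1) := by
      simp [pvU, hc, PySem.Dict.getD_insert_self, PySem.Dict.insert_insert_self,
            PySem.Dict.getD_empty]
    have hB : (pvBStep (sm, cd) (p, t)).1 = sm.insert p 1 := by
      simp [pvBStep, hc, PySem.Dict.insert_insert_self, PySem.Dict.getD_insert_self]
    refine ⟨?_, ?_, ?_⟩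
    · rw [hU]; exact PySem.Dict.nodup_keys_insert _ _ _ hnd
    · rw [hU]
      intro q hq
      rcases (PySem.Dict.mem_items_insert cd p _ q).1 hq with h1 | ⟨h1, _⟩
      · rw [h1]
        have hit : (PySem.Dict.empty.insert t (1 : Int)).items = [(t, (1 : Int))] := by
          rw [PySem.Dict.items_insert_of_not_contains _ _ (by simp)]
          rfl
        simp [PySem.Dict.keys, hit]
      · exact hinner q h1
    · rw [hB, hU, PySem.Dict.items_insert_of_not_contains sm 1 hsc,
          PySem.Dict.items_insert_of_not_contains cd _ hcc, hsm, List.map_append]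
      rfl

lemma pvInv_foldl (pairs : List (String × String)) (sm : PySem.Dict String Int)
    (cd : PySem.Dict String (PySem.Dict String Int)) (h : pvInv sm cd) :
    pvInv (pairs.foldl pvBStep (sm, cd)).1 (pairs.foldl pvU cd) := by
  induction pairs generalizing sm cd with
  | nil => exact h
  | cons pt rest ih =>
    have hstep : pvBStep (sm, cd) pt = ((pvBStep (sm, cd) pt).1, pvU cd pt) := by
      rw [← pvBStep_snd (sm, cd) pt]
    rw [List.foldl_cons, List.foldl_cons, hstep]
    exact ih _ _ (pvInv_step sm cd pt h)

lemma pvB_fold_snd (pairs : List (String × String)) (sm : PySem.Dict String Int)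
    (cd : PySem.Dict String (PySem.Dict String Int)) :
    (pairs.foldl pvBStep (sm, cd)).2 = pairs.foldl pvU cd := by
  induction pairs generalizing sm cd with
  | nil => rfl
  | cons pt rest ih => simpa [List.foldl_cons, pvBStep_snd] using ih (pvBStep (sm, cd) pt).1 (pvU cd pt)

lemma pvA_fold_eq (u : List String) (train : List (List String))
    (cd : PySem.Dict String (PySem.Dict String Int)) (acc : List (String × String)) :
    train.foldl (pvALine u) (acc.foldl pvU cd) =
      (train.foldl (fun a l => a ++ pvPairs u l) acc).foldl pvU cd := by
  induction train generalizing acc with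
  | nil => rfl
  | cons line rest ih =>
    rw [List.foldl_cons, List.foldl_cons, pvALine_eq, ← List.foldl_append, ih]

-- ===== VERDICT (by name: the statement is the Claim_ definition above) =====
theorem bigram_spec : Claim_equal_bigram := by
  intro train u _
  unfold Spec_bigram
  simp only [bigram, bigram_alt]
  have hcd : train.foldl (pvALine u) PySem.Dict.empty =
      (train.foldl (fun a l => a ++ pvPairs u l) []).foldl pvU PySem.Dict.empty := by
    simpa using pvA_fold_eq u train PySem.Dict.empty []
  set pairs := train.foldl (fun a l => a ++ pvPairs u l) [] with hpairs
  have hinv0 : pvInv PySem.Dict.empty PySem.Dict.empty := by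
    unfold pvInv
    refine ⟨by simp, ?_, rfl⟩
    intro q hq
    cases hq
  have hinv := pvInv_foldl pairs PySem.Dict.empty PySem.Dict.empty hinv0
  have hsnd := pvB_fold_snd pairs PySem.Dict.empty PySem.Dict.empty
  obtain ⟨hnd, -, hsm⟩ := hinv
  have hsmA : ((train.foldl (pvALine u) PySem.Dict.empty).items.foldl
      (fun sm p => sm.insert p.1 p.2.values.sum) (PySem.Dict.empty : PySem.Dict String Int)).items
      = (pairs.foldl pvU PySem.Dict.empty).items.map (fun q => (q.1, q.2.values.sum)) := by
    rw [hcd]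
    have := PySem.Dict.items_foldl_insert_fresh (pairs.foldl pvU PySem.Dict.empty).items
      (fun p => p.1) (fun p => p.2.values.sum) (PySem.Dict.empty : PySem.Dict String Int)
      (by intro a _; simp) (by simpa [PySem.Dict.keys] using hnd)
    simpa using this
  refine Prod.ext ?_ ?_
  · rw [hsmA, hsm]
  · rw [hcd, hsnd]
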